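-- pv_equiv track=rewrite | github.com/yannickloth/W33-Theory | scripts/w33_permrep_association.py | orbit_of_group_on_points
-- ===== SOURCE A (Python) =====
-- from collections import Counter, deque
-- from typing import Dict, Iterable, List, Set, Tuple
--
-- def orbit_of_group_on_points(
--     generators: Iterable[tuple[int, ...]], start: int
-- ) -> List[int]:
--     gens = list(generators)
--     seen = {start}
--     q = deque([start])
--     while q:
--         u = q.popleft()
--         for g in gens:
--             v = g[u]
--             if v not in seen:
--                 seen.add(v)
--                 q.append(v)
--     return sorted(seen)
-- ===== SOURCE B (Python) =====
-- def orbit_of_group_on_points(generators, start):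
--     gens = list(generators)
--     orbit = {start}
--     while True:
--         new = set(orbit)
--         for u in orbit:
--             for g in gens:
--                 new.add(g[u])
--         if len(new) == len(orbit):
--             return sorted(orbit)
--         orbit = new
-- ===== Notes on version B (the rewrite author's own statement) =====
-- stated objective: alternative
-- what changed: Replaces BFS with a queue and visited set by a queue-free fixpoint closure: repeatedly sweep the whole current set, applying every generator to every element, until a full sweep adds no new element, then sort.
-- outside the precondition, e.g. on orbit_of_group_on_points([(0, 5)], 0): A returns [0], B returns [0]
import Mathlib
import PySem

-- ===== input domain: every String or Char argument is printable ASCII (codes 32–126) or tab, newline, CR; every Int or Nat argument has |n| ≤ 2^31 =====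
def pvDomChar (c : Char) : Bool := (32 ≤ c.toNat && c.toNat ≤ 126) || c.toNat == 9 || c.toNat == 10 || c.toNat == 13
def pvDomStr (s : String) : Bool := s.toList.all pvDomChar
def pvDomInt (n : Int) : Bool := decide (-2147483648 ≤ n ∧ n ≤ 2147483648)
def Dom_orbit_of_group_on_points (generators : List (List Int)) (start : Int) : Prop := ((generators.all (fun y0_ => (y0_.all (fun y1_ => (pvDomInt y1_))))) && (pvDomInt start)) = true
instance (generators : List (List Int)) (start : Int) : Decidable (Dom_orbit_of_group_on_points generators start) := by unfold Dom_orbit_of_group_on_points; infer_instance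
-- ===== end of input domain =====

-- B computes the orbit by a queue-free fixpoint closure (repeated full-set sweeps) instead of A's
-- BFS with a deque; equivalence of the RETURN value is proved under Pre_ (no IndexError).

-- ===== PORT A =====
-- fuel bound: the orbit set never exceeds 1 + total number of generator entries, so
-- 2*(that) pops more than suffice for the BFS loop (proved in the lemmas below).
def pvBound (generators : List (List Int)) : Nat := generators.flatten.length + 1

-- one BFS step: 'for g in gens: v = g[u]; if v not in seen: seen.add(v); q.append(v)'
def pvBfsStep (u : Int) (sq : List Int × List Int) (g : List Int) : List Int × List Int :=
  let v := PySem.List.pyGetD g u 0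
  if v ∈ sq.1 then sq else (sq.1 ++ [v], sq.2 ++ [v])

-- 'while q: u = q.popleft(); …' (seen kept as a nodup list = the Python set; fuel cannot run out, see pvBfs_good)
def pvBfs (gens : List (List Int)) : Nat → List Int → List Int → List Int
  | 0, seen, _ => seen
  | fuel + 1, seen, q =>
    match q with
    | [] => seen
    | u :: qt =>
      let p := gens.foldl (pvBfsStep u) (seen, qt)
      pvBfs gens fuel p.1 p.2

def orbit_of_group_on_points (generators : List (List Int)) (start : Int) : List Int :=
  PySem.List.sorted (pvBfs generators (2 * pvBound generators) [start] [start]) (fun x => x)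

-- ===== PORT B =====
-- one full sweep: 'new = set(orbit); for u in orbit: for g in gens: new.add(g[u])'
def pvSweep (gens : List (List Int)) (S : List Int) : List Int :=
  S.foldl (fun acc u => gens.foldl (fun s g => PySem.Set.add s (PySem.List.pyGetD g u 0)) acc) S

-- 'while True: … if len(new) == len(orbit): return sorted(orbit); orbit = new'
-- (the set grows strictly each pass, so pvBound passes more than suffice; see pvSweepLoop_good)
def pvSweepLoop (gens : List (List Int)) : Nat → List Int → List Int
  | 0, S => S
  | fuel + 1, S =>
    let S' := pvSweep gens S
    if S'.length = S.length then S else pvSweepLoop gens fuel S'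

def orbit_of_group_on_points_alt (generators : List (List Int)) (start : Int) : List Int :=
  PySem.List.sorted (pvSweepLoop generators (generators.flatten.length + 1) [start]) (fun x => x)

-- ===== PRECONDITION & SPEC =====
-- Pre_ is a closed-form sufficient no-IndexError condition: start and every generator entry must be a
-- valid (possibly negative) Python index into every generator. It also excludes some inputs whose
-- invalid entries are never reached by the orbit, on which A returns normally (B returns the same value there).
def Pre_orbit_of_group_on_points (generators : List (List Int)) (start : Int) : Prop :=
  (∀ g ∈ generators, PySem.Raise.InRange g.length start) ∧
  (∀ v ∈ generators.flatten, ∀ g ∈ generators, PySem.Raise.InRange g.length v)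
instance (generators : List (List Int)) (start : Int) : Decidable (Pre_orbit_of_group_on_points generators start) := by
  unfold Pre_orbit_of_group_on_points; infer_instance

def pvWitness_orbit_of_group_on_points : List (List Int) × Int := ([[1, 0], [0, 1]], 0)

def Spec_orbit_of_group_on_points (generators : List (List Int)) (start : Int) (out : List Int) : Prop := out = orbit_of_group_on_points_alt generators start
instance (generators : List (List Int)) (start : Int) (out : List Int) : Decidable (Spec_orbit_of_group_on_points generators start out) := by unfold Spec_orbit_of_group_on_points; infer_instance

-- ===== CLAIM (what is proved, stated in full; the proofs are below) =====
def Claim_equal_orbit_of_group_on_points : Prop := ∀ (generators : List (List Int)) (start : Int), Dom_orbit_of_group_on_points generators start → Pre_orbit_of_group_on_points generators start → Spec_orbit_of_group_on_points generators start (orbit_of_group_on_points generators start)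

-- ===== LEMMAS AND PROOFS =====

-- the orbit: values reachable from start by repeatedly applying generators
inductive pvReach (gens : List (List Int)) (start : Int) : Int → Prop
  | base : pvReach gens start start
  | step (u : Int) (g : List Int) : pvReach gens start u → g ∈ gens →
      pvReach gens start (PySem.List.pyGetD g u 0)

-- what both loops produce: a nodup list containing start, contained in the orbit, closed under the generators
def pvGood (gens : List (List Int)) (start : Int) (T : List Int) : Prop :=
  T.Nodup ∧ start ∈ T ∧ (∀ x ∈ T, pvReach gens start x) ∧
  (∀ u ∈ T, ∀ g ∈ gens, PySem.List.pyGetD g u 0 ∈ T)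

theorem pvReach_mem (gens : List (List Int)) (start : Int) (T : List Int)
    (hT : pvGood gens start T) : ∀ v, pvReach gens start v → v ∈ T := by
  intro v hv
  induction hv with
  | base => exact hT.2.1
  | step u g hu hg ih => exact hT.2.2.2 u ih g hg

theorem pvGood_perm (gens : List (List Int)) (start : Int) (T₁ T₂ : List Int)
    (h₁ : pvGood gens start T₁) (h₂ : pvGood gens start T₂) : T₁.Perm T₂ := by
  rw [List.perm_ext_iff_of_nodup h₁.1 h₂.1]
  intro x
  constructor
  · intro hx; exact pvReach_mem gens start T₂ h₂ x (h₁.2.2.1 x hx)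
  · intro hx; exact pvReach_mem gens start T₁ h₁ x (h₂.2.2.1 x hx)

-- under Pre_, start :: flatten is closed under the generators (and images of its members lie in flatten)
theorem pvMemBound (gens : List (List Int)) (start : Int)
    (hpre : Pre_orbit_of_group_on_points gens start) (u : Int)
    (hu : u ∈ start :: gens.flatten) (g : List Int) (hg : g ∈ gens) :
    PySem.List.pyGetD g u 0 ∈ start :: gens.flatten := by
  have hir : PySem.Raise.InRange g.length u := by
    rcases List.mem_cons.mp hu with h | h
    · subst h; exact hpre.1 g hg
    · exact hpre.2 u h g hg
  have : PySem.List.pyGetD g u 0 ∈ g := PySem.List.pyGetD_mem g 0 hir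
  exact List.mem_cons_of_mem _ (List.mem_flatten.mpr ⟨g, hg, this⟩)

theorem pvLen_le_bound (gens : List (List Int)) (start : Int) (S : List Int)
    (hnd : S.Nodup) (hsub : ∀ x ∈ S, x ∈ start :: gens.flatten) :
    S.length ≤ pvBound gens := by
  have : S.Subperm (start :: gens.flatten) := hnd.subperm hsub
  have := this.length_le
  simpa [pvBound] using this

-- the inner BFS fold over the generators appends exactly the fresh images of u to both seen and q
theorem pvFoldA (u : Int) : ∀ (gs : List (List Int)) (s t : List Int), s.Nodup →
    ∃ d, gs.foldl (pvBfsStep u) (s, t) = (s ++ d, t ++ d) ∧ (s ++ d).Nodup ∧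
      (∀ v ∈ d, ∃ g ∈ gs, v = PySem.List.pyGetD g u 0) ∧
      (∀ g ∈ gs, PySem.List.pyGetD g u 0 ∈ s ++ d) := by
  intro gs
  induction gs with
  | nil => intro s t hnd; exact ⟨[], by simp, by simpa using hnd, by simp, by simp⟩
  | cons g gs ih =>
    intro s t hnd
    by_cases hv : PySem.List.pyGetD g u 0 ∈ s
    · obtain ⟨d, heq, hd, hsrc, himg⟩ := ih s t hnd
      refine ⟨d, ?_, hd, ?_, ?_⟩
      · simpa [List.foldl_cons, pvBfsStep, hv] using heq
      · intro v hvd; obtain ⟨g', hg', he⟩ := hsrc v hvd; exact ⟨g', List.mem_cons_of_mem _ hg', he⟩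
      · intro g' hg'
        rcases List.mem_cons.mp hg' with h | h
        · subst h; exact List.mem_append_left _ hv
        · exact himg g' h
    · obtain ⟨d, heq, hd, hsrc, himg⟩ := ih (s ++ [PySem.List.pyGetD g u 0]) (t ++ [PySem.List.pyGetD g u 0])
        (by simp [List.nodup_append, hnd]; exact fun a ha h => hv (h ▸ ha))
      refine ⟨PySem.List.pyGetD g u 0 :: d, ?_, by simpa using hd, ?_, ?_⟩
      · simpa [List.foldl_cons, pvBfsStep, hv] using heq
      · intro v hvd
        rcases List.mem_cons.mp hvd with h | h
        · exact ⟨g, List.mem_cons_self, h⟩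
        · obtain ⟨g', hg', he⟩ := hsrc v h; exact ⟨g', List.mem_cons_of_mem _ hg', he⟩
      · intro g' hg'
        rcases List.mem_cons.mp hg' with h | h
        · subst h; simp
        · have := himg g' h; simpa using this
-- BFS main invariant: with enough fuel the loop returns a Good set
theorem pvBfs_good (gens : List (List Int)) (start : Int)
    (hpre : Pre_orbit_of_group_on_points gens start) :
    ∀ (fuel : Nat) (seen q : List Int), seen.Nodup → (∀ x ∈ q, x ∈ seen) →
    (∀ x ∈ seen, x ∈ start :: gens.flatten) → start ∈ seen →
    (∀ x ∈ seen, pvReach gens start x) →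
    (∀ u ∈ seen, u ∈ q ∨ ∀ g ∈ gens, PySem.List.pyGetD g u 0 ∈ seen) →
    q.length + 2 * pvBound gens ≤ fuel + 2 * seen.length →
    pvGood gens start (pvBfs gens fuel seen q) := by
  intro fuel
  induction fuel with
  | zero =>
    intro seen q hnd hq hsub hst hreach hsemi hfuel
    have hlen := pvLen_le_bound gens start seen hnd hsub
    have hq0 : q = [] := by
      have : q.length = 0 := by omega
      exact List.eq_nil_of_length_eq_zero this
    subst hq0
    refine ⟨hnd, hst, hreach, ?_⟩
    intro u hu g hg
    rcases hsemi u hu with h | h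
    · simp at h
    · exact h g hg
  | succ fuel ih =>
    intro seen q hnd hq hsub hst hreach hsemi hfuel
    match q with
    | [] =>
      refine ⟨hnd, hst, hreach, ?_⟩
      intro u hu g hg
      rcases hsemi u hu with h | h
      · simp at h
      · exact h g hg
    | u :: qt =>
      obtain ⟨d, heq, hd, hsrc, himg⟩ := pvFoldA u gens seen qt hnd
      have hu_seen : u ∈ seen := hq u List.mem_cons_self
      show pvGood gens start (pvBfs gens fuel (gens.foldl (pvBfsStep u) (seen, qt)).1
        (gens.foldl (pvBfsStep u) (seen, qt)).2)
      rw [heq]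
      apply ih
      · exact hd
      · intro x hx
        rcases List.mem_append.mp hx with h | h
        · exact List.mem_append_left _ (hq x (List.mem_cons_of_mem _ h))
        · exact List.mem_append_right _ h
      · intro x hx
        rcases List.mem_append.mp hx with h | h
        · exact hsub x h
        · obtain ⟨g, hg, he⟩ := hsrc x h
          subst he
          exact pvMemBound gens start hpre u (hsub u hu_seen) g hg
      · exact List.mem_append_left _ hst
      · intro x hx
        rcases List.mem_append.mp hx with h | h
        · exact hreach x h
        · obtain ⟨g, hg, he⟩ := hsrc x h
          subst he
          exact pvReach.step u g (hreach u hu_seen) hg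
      · intro w hw
        rcases List.mem_append.mp hw with h | h
        · by_cases hwu : w = u
          · subst hwu; exact Or.inr himg
          · rcases hsemi w h with h2 | h2
            · rcases List.mem_cons.mp h2 with h3 | h3
              · exact absurd h3 hwu
              · exact Or.inl (List.mem_append_left _ h3)
            · exact Or.inr (fun g hg => List.mem_append_left _ (h2 g hg))
        · exact Or.inl (List.mem_append_right _ h)
      · simp only [List.length_append]
        simp only [List.length_cons] at hfuel
        omega

-- one sweep appends only images of members, contains all those images, keeps Nodup
theorem pvSweepInner (gens : List (List Int)) (u : Int) (acc : List Int) (hnd : acc.Nodup) :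
    (acc ⊆ gens.foldl (fun s g => PySem.Set.add s (PySem.List.pyGetD g u 0)) acc) ∧
    (gens.foldl (fun s g => PySem.Set.add s (PySem.List.pyGetD g u 0)) acc).Nodup ∧
    (∀ v ∈ gens.foldl (fun s g => PySem.Set.add s (PySem.List.pyGetD g u 0)) acc,
      v ∈ acc ∨ ∃ g ∈ gens, v = PySem.List.pyGetD g u 0) ∧
    (∀ g ∈ gens, PySem.List.pyGetD g u 0 ∈
      gens.foldl (fun s g => PySem.Set.add s (PySem.List.pyGetD g u 0)) acc) := by
  refine ⟨?_, ?_, ?_, ?_⟩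
  · intro x hx
    exact (PySem.Set.mem_foldl_add _ _ _ _).mpr (Or.inl hx)
  · rw [← PySem.Set.update_map_eq_foldl_add]
    exact PySem.Set.nodup_update _ _ hnd
  · intro v hv
    rcases (PySem.Set.mem_foldl_add _ _ _ _).mp hv with h | ⟨g, hg, he⟩
    · exact Or.inl h
    · exact Or.inr ⟨g, hg, he⟩
  · intro g hg
    exact (PySem.Set.mem_foldl_add _ _ _ _).mpr (Or.inr ⟨g, hg, rfl⟩)

theorem pvSweepOuter (gens : List (List Int)) : ∀ (us acc : List Int), acc.Nodup →
    (acc ⊆ us.foldl (fun acc u => gens.foldl (fun s g => PySem.Set.add s (PySem.List.pyGetD g u 0)) acc) acc) ∧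
    (us.foldl (fun acc u => gens.foldl (fun s g => PySem.Set.add s (PySem.List.pyGetD g u 0)) acc) acc).Nodup ∧
    (∀ v ∈ us.foldl (fun acc u => gens.foldl (fun s g => PySem.Set.add s (PySem.List.pyGetD g u 0)) acc) acc,
      v ∈ acc ∨ ∃ u ∈ us, ∃ g ∈ gens, v = PySem.List.pyGetD g u 0) ∧
    (∀ u ∈ us, ∀ g ∈ gens, PySem.List.pyGetD g u 0 ∈
      us.foldl (fun acc u => gens.foldl (fun s g => PySem.Set.add s (PySem.List.pyGetD g u 0)) acc) acc) := by
  intro us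
  induction us with
  | nil => intro acc hnd; exact ⟨fun x hx => hx, hnd, fun v hv => Or.inl hv, by simp⟩
  | cons u us ih =>
    intro acc hnd
    obtain ⟨hsub1, hnd1, hsrc1, himg1⟩ := pvSweepInner gens u acc hnd
    obtain ⟨hsub2, hnd2, hsrc2, himg2⟩ := ih _ hnd1
    simp only [List.foldl_cons]
    refine ⟨fun x hx => hsub2 (hsub1 hx), hnd2, ?_, ?_⟩
    · intro v hv
      rcases hsrc2 v hv with h | ⟨u', hu', hrest⟩
      · rcases hsrc1 v h with h2 | ⟨g, hg, he⟩
        · exact Or.inl h2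
        · exact Or.inr ⟨u, List.mem_cons_self, g, hg, he⟩
      · exact Or.inr ⟨u', List.mem_cons_of_mem _ hu', hrest⟩
    · intro u' hu' g hg
      rcases List.mem_cons.mp hu' with h | h
      · subst h; exact hsub2 (himg1 g hg)
      · exact himg2 u' h g hg

-- the sweep-until-fixpoint loop returns a Good set
theorem pvSweepLoop_good (gens : List (List Int)) (start : Int)
    (hpre : Pre_orbit_of_group_on_points gens start) :
    ∀ (fuel : Nat) (S : List Int), S.Nodup → start ∈ S →
    (∀ x ∈ S, pvReach gens start x) → (∀ x ∈ S, x ∈ start :: gens.flatten) →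
    pvBound gens + 1 ≤ fuel + S.length →
    pvGood gens start (pvSweepLoop gens fuel S) := by
  intro fuel
  induction fuel with
  | zero =>
    intro S hnd hst hreach hsub hfuel
    have := pvLen_le_bound gens start S hnd hsub
    omega
  | succ fuel ih =>
    intro S hnd hst hreach hsub hfuel
    obtain ⟨hsub1, hnd1, hsrc1, himg1⟩ := pvSweepOuter gens S S hnd
    show pvGood gens start (if (pvSweep gens S).length = S.length then S else pvSweepLoop gens fuel (pvSweep gens S))
    by_cases hlen : (pvSweep gens S).length = S.length
    · rw [if_pos hlen]
      have hperm : S.Perm (pvSweep gens S) :=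
        (hnd.subperm hsub1).perm_of_length_le (le_of_eq hlen)
      refine ⟨hnd, hst, hreach, ?_⟩
      intro u hu g hg
      exact hperm.mem_iff.mpr (himg1 u hu g hg)
    · rw [if_neg hlen]
      have hgrow : S.length < (pvSweep gens S).length := by
        have := (hnd.subperm hsub1).length_le
        change S.length ≤ (pvSweep gens S).length at this
        omega
      apply ih
      · exact hnd1
      · exact hsub1 hst
      · intro x hx
        rcases hsrc1 x hx with h | ⟨u, hu, g, hg, he⟩
        · exact hreach x h
        · subst he; exact pvReach.step u g (hreach u hu) hg
      · intro x hx
        rcases hsrc1 x hx with h | ⟨u, hu, g, hg, he⟩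
        · exact hsub x h
        · subst he; exact pvMemBound gens start hpre u (hsub u hu) g hg
      · omega

-- ===== VERDICT (by name: the statement is the Claim_ definition above) =====
theorem orbit_of_group_on_points_spec : Claim_equal_orbit_of_group_on_points := by
  intro gens start _ hpre
  unfold Spec_orbit_of_group_on_points orbit_of_group_on_points orbit_of_group_on_points_alt
  have hA : pvGood gens start (pvBfs gens (2 * pvBound gens) [start] [start]) := by
    apply pvBfs_good gens start hpre
    · simp
    · simp
    · simp
    · simp
    · intro x hx; simp at hx; subst hx; exact pvReach.base
    · intro u hu; simp at hu; subst hu; exact Or.inl (by simp)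
    · simp [pvBound]; omega
  have hB : pvGood gens start (pvSweepLoop gens (gens.flatten.length + 1) [start]) := by
    apply pvSweepLoop_good gens start hpre
    · simp
    · simp
    · intro x hx; simp at hx; subst hx; exact pvReach.base
    · simp
    · simp [pvBound]
  exact (PySem.List.sorted_id_eq_sorted_id_iff_perm _ _).mpr (pvGood_perm gens start _ _ hA hB)
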